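-- pv_equiv track=rewrite | github.com/OngoingMLProjects/Contrastive_Representation_Uncertainty | Contrastive_uncertainty/toy_replica/toy_experiments/train/automatic_evaluate_experiments.py | callback_filter
-- ===== SOURCE A (Python) =====
-- desired_key_dict = {'Mahalanobis Distance':'Mahalanobis AUROC OOD',
-- 'Nearest 10 Neighbours Class Quadratic 1D Typicality':'Normalized One Dim Class Quadratic Typicality KNN -10 OOD',
-- 'Nearest 10 Neighbours Class 1D Typicality': 'Normalized One Dim Class Typicality KNN - 10 OOD'}
--
-- def callback_filter(summary_info,evaluation_dict):
--     callbacks = evaluation_dict['callbacks']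
--     filtered_callbacks = []
--
--     # Make a dict connecting the callbacks and the inputs from the callbacks
--     for callback in callbacks:
--         desired_string = desired_key_dict[callback].lower()
--         desired_keys = [key for key, value in summary_info.items() if desired_string in key.lower()]
--         # if there are no keys already present, then the callback has not been used yet
--         if len(desired_keys) == 0:
--             filtered_callbacks.append(callback)
--
--     return filtered_callbacks
-- ===== SOURCE B (Python) =====
-- desired_key_dict = {'Mahalanobis Distance':'Mahalanobis AUROC OOD',
-- 'Nearest 10 Neighbours Class Quadratic 1D Typicality':'Normalized One Dim Class Quadratic Typicality KNN -10 OOD',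
-- 'Nearest 10 Neighbours Class 1D Typicality': 'Normalized One Dim Class Typicality KNN - 10 OOD'}
--
-- def callback_filter(summary_info, evaluation_dict):
--     callbacks = evaluation_dict['callbacks']
--     # map each distinct callback to its lowercased desired string (KeyError kept for unknown callbacks)
--     pairs = [(c, desired_key_dict[c].lower()) for c in dict.fromkeys(callbacks)]
--     # one pass over the summary keys: mark every callback whose string occurs in that key
--     used = set()
--     for key in summary_info:
--         kl = key.lower()
--         for c, s in pairs:
--             if s in kl:
--                 used.add(c)
--     return [c for c in callbacks if c not in used]
-- ===== Notes on version B (the rewrite author's own statement) =====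
-- stated objective: alternative
-- what changed: Inverts the loop nesting: instead of re-scanning and re-lowercasing every summary key for each callback, B maps the distinct callbacks to their lowercased desired strings once, makes one pass over the summary keys (lowercasing each key once) marking matched callbacks in a used-set, and finally filters the callbacks against that set.
import Mathlib
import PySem

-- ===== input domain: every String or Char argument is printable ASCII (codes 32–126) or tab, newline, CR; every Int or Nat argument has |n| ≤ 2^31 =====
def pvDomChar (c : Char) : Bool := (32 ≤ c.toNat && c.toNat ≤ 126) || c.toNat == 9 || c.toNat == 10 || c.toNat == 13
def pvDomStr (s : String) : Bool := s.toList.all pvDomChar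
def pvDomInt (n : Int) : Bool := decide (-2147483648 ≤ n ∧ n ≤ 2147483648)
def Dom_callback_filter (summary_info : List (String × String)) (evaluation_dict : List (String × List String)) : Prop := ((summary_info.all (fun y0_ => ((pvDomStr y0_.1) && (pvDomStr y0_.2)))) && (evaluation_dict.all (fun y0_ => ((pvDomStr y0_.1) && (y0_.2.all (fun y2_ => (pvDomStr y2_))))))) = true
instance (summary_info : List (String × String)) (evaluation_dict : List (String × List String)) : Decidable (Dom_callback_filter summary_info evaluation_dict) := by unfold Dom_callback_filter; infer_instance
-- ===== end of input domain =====

-- B inverts A's loop nesting: it lowercases each summary key once and marks matched callbacks in a set,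
-- instead of re-scanning (and re-lowercasing) all summary keys for every callback. Objective: alternative decomposition.

-- the module-level desired_key_dict (shared context of A and B)
def desiredKeyDict : PySem.Dict String String := PySem.Dict.ofList
  [("Mahalanobis Distance", "Mahalanobis AUROC OOD"),
   ("Nearest 10 Neighbours Class Quadratic 1D Typicality", "Normalized One Dim Class Quadratic Typicality KNN -10 OOD"),
   ("Nearest 10 Neighbours Class 1D Typicality", "Normalized One Dim Class Typicality KNN - 10 OOD")]

-- ===== PORT A =====
def callback_filter (summary_info : List (String × String)) (evaluation_dict : List (String × List String)) : List String :=
  let callbacks := ((PySem.Dict.mk evaluation_dict).get? "callbacks").getD []  -- Pre_ guarantees the key exists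
  callbacks.foldl (fun filtered_callbacks callback =>
    let desired_string := PySem.Str.lower ((desiredKeyDict.get? callback).getD "")  -- Pre_ guarantees the key exists
    let desired_keys := (summary_info.filter (fun kv => PySem.Str.isIn desired_string (PySem.Str.lower kv.1))).map (·.1)
    if desired_keys.length = 0 then filtered_callbacks ++ [callback] else filtered_callbacks) []

-- ===== PORT B =====
def callback_filter_alt (summary_info : List (String × String)) (evaluation_dict : List (String × List String)) : List String :=
  let callbacks := ((PySem.Dict.mk evaluation_dict).get? "callbacks").getD []  -- Pre_ guarantees the key exists
  let pairs := (PySem.List.dedup callbacks).map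
    (fun c => (c, PySem.Str.lower ((desiredKeyDict.get? c).getD "")))
  let used : PySem.Set String := summary_info.foldl (fun u kv =>
      let kl := PySem.Str.lower kv.1
      pairs.foldl (fun u p => if PySem.Str.isIn p.2 kl then PySem.Set.add u p.1 else u) u)
    PySem.Set.empty
  callbacks.filter (fun c => !(PySem.Set.contains used c))

-- ===== PRECONDITION & SPEC =====
-- A raises KeyError when evaluation_dict lacks 'callbacks' or a callback is missing from desired_key_dict; Pre_ excludes exactly those.
def Pre_callback_filter (summary_info : List (String × String)) (evaluation_dict : List (String × List String)) : Prop :=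
  ((PySem.Dict.mk evaluation_dict).get? "callbacks").isSome = true ∧
  ∀ c ∈ ((PySem.Dict.mk evaluation_dict).get? "callbacks").getD [], (desiredKeyDict.get? c).isSome = true
instance (summary_info : List (String × String)) (evaluation_dict : List (String × List String)) : Decidable (Pre_callback_filter summary_info evaluation_dict) := by unfold Pre_callback_filter; infer_instance

def pvWitness_callback_filter : (List (String × String)) × (List (String × List String)) :=
  ([("Mahalanobis AUROC OOD run1", "0.9")], [("callbacks", ["Mahalanobis Distance", "Nearest 10 Neighbours Class 1D Typicality"])])

def Spec_callback_filter (summary_info : List (String × String)) (evaluation_dict : List (String × List String)) (out : List String) : Prop := out = callback_filter_alt summary_info evaluation_dict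
instance (summary_info : List (String × String)) (evaluation_dict : List (String × List String)) (out : List String) : Decidable (Spec_callback_filter summary_info evaluation_dict out) := by unfold Spec_callback_filter; infer_instance

-- ===== CLAIM (what is proved, stated in full; the proofs are below) =====
def Claim_equal_callback_filter : Prop := ∀ (summary_info : List (String × String)) (evaluation_dict : List (String × List String)), Dom_callback_filter summary_info evaluation_dict → Pre_callback_filter summary_info evaluation_dict → Spec_callback_filter summary_info evaluation_dict (callback_filter summary_info evaluation_dict)

-- ===== LEMMAS AND PROOFS =====

-- membership after B's inner marking loop over `pairs`
theorem mem_mark_foldl (pairs : List (String × String)) (q : String × String → Bool)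
    (u : PySem.Set String) (x : String) :
    (x ∈ pairs.foldl (fun u p => if q p then PySem.Set.add u p.1 else u) u) ↔
      x ∈ u ∨ ∃ p ∈ pairs, q p ∧ x = p.1 := by
  induction pairs generalizing u with
  | nil => simp
  | cons hd tl ih =>
    simp only [List.foldl_cons]
    by_cases hq : q hd <;> simp [hq, ih, PySem.Set.mem_add] <;> tauto

-- membership after B's outer loop over the summary keys
theorem mem_used_foldl (si : List (String × String)) (pairs : List (String × String))
    (u : PySem.Set String) (x : String) :
    (x ∈ si.foldl (fun u kv =>
        pairs.foldl (fun u p => if PySem.Str.isIn p.2 (PySem.Str.lower kv.1) then PySem.Set.add u p.1 else u) u) u) ↔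
      x ∈ u ∨ ∃ kv ∈ si, ∃ p ∈ pairs, PySem.Str.isIn p.2 (PySem.Str.lower kv.1) ∧ x = p.1 := by
  induction si generalizing u with
  | nil => simp
  | cons hd tl ih =>
    simp only [List.foldl_cons, ih, mem_mark_foldl]
    constructor
    · rintro (h | h)
      · rcases h with h | ⟨p, hp, hq, hx⟩
        · exact Or.inl h
        · exact Or.inr ⟨hd, by simp, p, hp, hq, hx⟩
      · rcases h with ⟨kv, hkv, rest⟩
        exact Or.inr ⟨kv, by simp [hkv], rest⟩
    · rintro (h | ⟨kv, hkv, p, hp, hq, hx⟩)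
      · exact Or.inl (Or.inl h)
      · rcases List.mem_cons.mp hkv with rfl | hkv
        · exact Or.inl (Or.inr ⟨p, hp, hq, hx⟩)
        · exact Or.inr ⟨kv, hkv, p, hp, hq, hx⟩

theorem callback_filter_spec : Claim_equal_callback_filter := by
  intro si ed _hdom _hpre
  unfold Spec_callback_filter callback_filter callback_filter_alt
  simp only []
  set cbs := ((PySem.Dict.mk ed).get? "callbacks").getD [] with hcbs
  set f : String → String := fun c => PySem.Str.lower ((desiredKeyDict.get? c).getD "") with hf
  rw [show (fun (filtered_callbacks : List String) (callback : String) =>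
      if ((si.filter (fun kv => PySem.Str.isIn (f callback) (PySem.Str.lower kv.1))).map (·.1)).length = 0
      then filtered_callbacks ++ [callback] else filtered_callbacks)
    = (fun acc x => if (decide (((si.filter (fun kv => PySem.Str.isIn (f x) (PySem.Str.lower kv.1))).map (·.1)).length = 0)) = true then acc ++ [id x] else acc) from by
      funext acc x; simp only [decide_eq_true_eq, id_eq]]
  rw [PySem.List.foldl_append_if]
  simp only [List.nil_append, List.map_id]
  apply List.filter_congr
  intro c hc
  have hmem : ((List.foldl (fun u kv =>
        List.foldl (fun u p => if PySem.Str.isIn p.2 (PySem.Str.lower kv.1) = true then u.add p.1 else u) u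
          ((PySem.List.dedup cbs).map (fun c => (c, f c)))) PySem.Set.empty si).contains c = true) ↔
      ∃ kv ∈ si, PySem.Str.isIn (f c) (PySem.Str.lower kv.1) = true := by
    rw [PySem.Set.contains_iff, mem_used_foldl]
    constructor
    · rintro (h | ⟨kv, hkv, p, hp, hq, hx⟩)
      · simp [PySem.Set.empty] at h
      · rcases List.mem_map.mp hp with ⟨c', _hc', rfl⟩
        subst hx
        exact ⟨kv, hkv, hq⟩
    · rintro ⟨kv, hkv, hin⟩
      exact Or.inr ⟨kv, hkv, (c, f c),
        List.mem_map_of_mem ((PySem.List.mem_dedup cbs c).mpr hc), hin, rfl⟩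
  by_cases hex : ∃ kv ∈ si, PySem.Str.isIn (f c) (PySem.Str.lower kv.1) = true
  · have h1 : si.filter (fun kv => PySem.Str.isIn (f c) (PySem.Str.lower kv.1)) ≠ [] := by
      rcases hex with ⟨kv, hkv, hin⟩
      intro hnil
      exact (List.filter_eq_nil_iff.mp hnil kv hkv) hin
    rw [hmem.mpr hex]
    simp only [Bool.not_true, decide_eq_false_iff_not, List.length_map]
    intro hlen
    exact h1 (List.length_eq_zero_iff.mp hlen)
  · have hb : ((List.foldl (fun u kv =>
        List.foldl (fun u p => if PySem.Str.isIn p.2 (PySem.Str.lower kv.1) = true then u.add p.1 else u) u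
          ((PySem.List.dedup cbs).map (fun c => (c, f c)))) PySem.Set.empty si).contains c) = false := by
      rw [Bool.eq_false_iff]
      intro h
      exact hex (hmem.mp h)
    rw [hb]
    simp only [Bool.not_false, decide_eq_true_eq, List.length_map, List.length_eq_zero_iff]
    refine List.filter_eq_nil_iff.mpr (fun kv hkv hin => hex ⟨kv, hkv, hin⟩)
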